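-- pv_equiv track=rewrite | github.com/zdimon/pressa-besa | backend/promo_code/models/utils.py | code_format
-- ===== SOURCE A (Python) =====
-- def code_format(code, step=5):
--     result = list(code)
--     index = 5
--     spaces = 0
--     while index < len(code):
--         result.insert(index+spaces,'-')
--         index+=5
--         spaces+=1
--     return "".join(result)
-- ===== SOURCE B (Python) =====
-- def code_format(code, step=5):
--     out = []
--     for i, ch in enumerate(code):
--         if i and i % 5 == 0:
--             out.append('-')
--         out.append(ch)
--     return "".join(out)
-- ===== Notes on version B (the rewrite author's own statement) =====
-- stated objective: faster
-- what changed: Replaces A's repeated list.insert of dashes at computed offsets (each insert shifts the tail) with a single enumerate pass that appends a dash before every 5th character.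
import Mathlib
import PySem

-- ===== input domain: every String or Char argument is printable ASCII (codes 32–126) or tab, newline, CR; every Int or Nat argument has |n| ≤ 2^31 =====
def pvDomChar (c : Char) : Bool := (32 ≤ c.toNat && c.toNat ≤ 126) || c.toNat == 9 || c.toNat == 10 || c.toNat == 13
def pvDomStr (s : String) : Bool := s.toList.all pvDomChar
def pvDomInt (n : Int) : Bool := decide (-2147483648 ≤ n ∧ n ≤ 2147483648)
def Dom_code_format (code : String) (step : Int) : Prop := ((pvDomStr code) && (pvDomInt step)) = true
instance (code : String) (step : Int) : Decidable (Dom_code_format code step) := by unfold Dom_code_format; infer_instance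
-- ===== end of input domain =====

-- B replaces A's repeated list.insert of dashes into a copy of the string with a single enumerate pass appending a dash before every 5th character; return value only, neither version mutates its argument.

-- ===== PORT A =====
-- A's while loop: state (result, index, spaces), n = len(code) fixed
def codeFormatLoop (result : List Char) (index spaces n : Nat) : List Char :=
  if index < n then
    codeFormatLoop (PySem.List.insert result ((index : Int) + (spaces : Int)) '-')
      (index + 5) (spaces + 1) n
  else result
termination_by n - index

def code_format (code : String) (step : Int) : String :=
  String.mk (codeFormatLoop code.toList 5 0 code.toList.length)

-- ===== PORT B =====
def code_format_alt (code : String) (step : Int) : String :=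
  String.mk ((PySem.List.enumerate code.toList 0).foldl
    (fun out p => (if p.1 ≠ 0 ∧ PySem.Int.mod p.1 5 = 0 then out ++ ['-'] else out) ++ [p.2])
    ([] : List Char))

-- ===== PRECONDITION & SPEC =====
def Spec_code_format (code : String) (step : Int) (out : String) : Prop := out = code_format_alt code step
instance (code : String) (step : Int) (out : String) : Decidable (Spec_code_format code step out) := by unfold Spec_code_format; infer_instance

-- ===== CLAIM (what is proved, stated in full; the proofs are below) =====
def Claim_equal_code_format : Prop := ∀ (code : String) (step : Int), Dom_code_format code step → Spec_code_format code step (code_format code step)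

-- ===== LEMMAS AND PROOFS =====

-- the common value: dash-separated groups of 5; dashH rest = rendering of the remainder at a fresh group boundary (with its leading dash)
def dashH : List Char → List Char
  | [] => []
  | c :: t => '-' :: c :: t.take 4 ++ dashH (t.drop 4)
termination_by l => l.length
decreasing_by simp

theorem dashH_nil : dashH [] = [] := by rw [dashH.eq_def]

theorem dashH_cons (c : Char) (t : List Char) :
    dashH (c :: t) = '-' :: c :: t.take 4 ++ dashH (t.drop 4) := by rw [dashH.eq_def]

-- B's pass, char by char, with the running absolute index
def dashF : List Char → Nat → List Char
  | [], _ => []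
  | c :: t, i => (if i ≠ 0 ∧ i % 5 = 0 then ['-'] else []) ++ c :: dashF t (i + 1)

theorem mod_int_nat (k : Nat) : (PySem.Int.mod (k : Int) 5 = 0) ↔ k % 5 = 0 := by
  rw [PySem.Int.mod, Int.fmod_eq_emod]
  simp
  omega

theorem foldB (l : List Char) : ∀ (k : Nat) (acc : List Char),
    (PySem.List.enumerate l (k : Int)).foldl
      (fun out p => (if p.1 ≠ 0 ∧ PySem.Int.mod p.1 5 = 0 then out ++ ['-'] else out) ++ [p.2])
      acc = acc ++ dashF l k := by
  induction l with
  | nil => intro k acc; simp [PySem.List.enumerate_nil, dashF]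
  | cons c t ih =>
    intro k acc
    rw [PySem.List.enumerate_cons, List.foldl_cons,
      show ((k : Int) + 1) = ((k + 1 : Nat) : Int) by push_cast; ring, ih]
    have hcond : ((k : Int) ≠ 0 ∧ PySem.Int.mod (k : Int) 5 = 0) ↔ (k ≠ 0 ∧ k % 5 = 0) := by
      rw [mod_int_nat]; simp
    simp only [dashF]
    by_cases h : k ≠ 0 ∧ k % 5 = 0
    · simp only [if_pos (hcond.mpr h), if_pos h]; simp
    · simp only [if_neg (fun hh => h (hcond.mp hh)), if_neg h]; simp

theorem dashF_eq_dashH (l : List Char) : ∀ (i : Nat), 0 < i →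
    dashF l i = l.take ((5 - i % 5) % 5) ++ dashH (l.drop ((5 - i % 5) % 5)) := by
  induction l with
  | nil => intro i _; simp [dashF, dashH_nil]
  | cons c t ih =>
    intro i hi
    have h5 : i % 5 = 0 ∨ i % 5 = 1 ∨ i % 5 = 2 ∨ i % 5 = 3 ∨ i % 5 = 4 := by omega
    simp only [dashF]
    rcases h5 with h | h | h | h | h
    · rw [if_pos ⟨by omega, h⟩, ih (i + 1) (by omega),
        show (i + 1) % 5 = 1 by omega, h]
      norm_num [dashH_cons]
    · rw [if_neg (by omega), ih (i + 1) (by omega), show (i + 1) % 5 = 2 by omega, h]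
      norm_num
    · rw [if_neg (by omega), ih (i + 1) (by omega), show (i + 1) % 5 = 3 by omega, h]
      norm_num
    · rw [if_neg (by omega), ih (i + 1) (by omega), show (i + 1) % 5 = 4 by omega, h]
      norm_num
    · rw [if_neg (by omega), ih (i + 1) (by omega), show (i + 1) % 5 = 0 by omega, h]
      norm_num

theorem dashF_zero (l : List Char) : dashF l 0 = l.take 5 ++ dashH (l.drop 5) := by
  cases l with
  | nil => simp [dashF, dashH_nil]
  | cons c t =>
    simp only [dashF]
    rw [dashF_eq_dashH t 1 (by omega)]
    norm_num

theorem loopA_spec (rest P : List Char) (s : Nat) (hP : P.length = 5 * (s + 1) + s) :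
    codeFormatLoop (P ++ rest) (5 * (s + 1)) s (5 * (s + 1) + rest.length)
      = P ++ dashH rest := by
  cases hrest : rest with
  | nil =>
    rw [codeFormatLoop]
    simp [dashH_nil]
  | cons c t =>
    subst hrest
    rw [codeFormatLoop, if_pos (by simp)]
    have hins : PySem.List.insert (P ++ c :: t) ((↑(5 * (s + 1)) : Int) + (s : Int)) '-'
        = P ++ '-' :: c :: t := by
      rw [show ((↑(5 * (s + 1)) : Int) + (s : Int)) = ((5 * (s + 1) + s : Nat) : Int) by
        push_cast; ring]
      rw [PySem.List.insert_natCast _ _ _ (by simp; omega)]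
      rw [← hP, List.take_left, List.drop_left]
    rw [hins]
    by_cases hlen : (c :: t).length ≤ 5
    · rw [codeFormatLoop, if_neg (by simp at hlen ⊢; omega)]
      have ht : t.length ≤ 4 := by simp at hlen; omega
      rw [dashH_cons, List.take_of_length_le ht, List.drop_of_length_le ht, dashH_nil]
      simp
    · have hsplit : P ++ '-' :: c :: t = (P ++ '-' :: (c :: t).take 5) ++ (c :: t).drop 5 := by
        simp
      have hn : 5 * (s + 1) + (c :: t).length = 5 * (s + 1 + 1) + ((c :: t).drop 5).length := by
        have hd : ((c :: t).drop 5).length = t.length - 4 := by simp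
        have hc : (c :: t).length = t.length + 1 := by simp
        omega
      rw [hsplit, hn, show 5 * (s + 1) + 5 = 5 * (s + 1 + 1) by ring]
      have h4 : min 4 t.length = 4 := Nat.min_eq_left (by
        have h6 := not_le.mp hlen; simp at h6; omega)
      rw [loopA_spec ((c :: t).drop 5) (P ++ '-' :: (c :: t).take 5) (s + 1)
        (by simp [h4]; omega)]
      rw [dashH_cons,
        show List.take 5 (c :: t) = c :: List.take 4 t from rfl,
        show List.drop 5 (c :: t) = List.drop 4 t from rfl]
      simp
termination_by rest.length
decreasing_by simp

theorem both_eq (l : List Char) :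
    codeFormatLoop l 5 0 l.length = l.take 5 ++ dashH (l.drop 5) := by
  by_cases h : l.length ≤ 5
  · rw [codeFormatLoop, if_neg (by omega)]
    rw [List.take_of_length_le h, List.drop_of_length_le h, dashH_nil]
    simp
  · have h5 : l = l.take 5 ++ l.drop 5 := by simp
    have hlem := loopA_spec (l.drop 5) (l.take 5) 0 (by simp [List.length_take]; omega)
    simp only [List.length_drop] at hlem
    rw [show (5 : Nat) * (0 + 1) = 5 by ring] at hlem
    rw [show l.length = 5 + (l.length - 5) by omega]
    calc codeFormatLoop l 5 0 (5 + (l.length - 5))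
        = codeFormatLoop (l.take 5 ++ l.drop 5) 5 0 (5 + (l.length - 5)) := by rw [← h5]
      _ = l.take 5 ++ dashH (l.drop 5) := hlem

-- ===== VERDICT (by name: the statement is the Claim_ definition above) =====
theorem code_format_spec : Claim_equal_code_format := by
  intro code step _
  unfold Spec_code_format code_format code_format_alt
  rw [both_eq]
  have h := foldB code.toList 0 []
  simp only [Nat.cast_zero, List.nil_append] at h
  rw [h, dashF_zero]
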